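-- pv_equiv track=rewrite | github.com/pypi-data/pypi-mirror-273 | packages/memodules/memodules-5.10.1.tar.gz/memodules-5.10.1/memodules/alphabet_to_integer/AlphabetToInteger.py | AtI
-- ===== SOURCE A (Python) =====
-- def AtI(alphabet: str) -> int:
--     """A(or a) -> 1\n
--     AA(or aa) -> 27"""
--     result = 0
--     if type(alphabet) == list:
--         result = []
--         for i in alphabet:
--             mid = 0
--             girder = len(i) - 1
--             for n in i:
--                 mid += (ord(n.upper()) - ord('A') + 1) * (26 ** girder)
--                 girder -= 1
--
--             result.append(mid)
--     elif type(alphabet) == str: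
--         girder = len(alphabet) - 1
--         for i in alphabet:
--             result += (ord(i.upper()) - ord('A') + 1) * (26 ** girder)
--             girder -= 1
--
--     return result
-- ===== SOURCE B (Python) =====
-- def AtI(alphabet: str) -> int:
--     """A(or a) -> 1\n
--     AA(or aa) -> 27"""
--     result = 0
--     for ch in alphabet:
--         result = result * 26 + (ord(ch.upper()) - ord('A') + 1)
--     return result
-- ===== Notes on version B (the rewrite author's own statement) =====
-- stated objective: faster
-- what changed: Replaces the positional sum with a fresh 26**girder big-int power per character by Horner's rule (result = result*26 + value), one multiply-add per character.
import Mathlib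
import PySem

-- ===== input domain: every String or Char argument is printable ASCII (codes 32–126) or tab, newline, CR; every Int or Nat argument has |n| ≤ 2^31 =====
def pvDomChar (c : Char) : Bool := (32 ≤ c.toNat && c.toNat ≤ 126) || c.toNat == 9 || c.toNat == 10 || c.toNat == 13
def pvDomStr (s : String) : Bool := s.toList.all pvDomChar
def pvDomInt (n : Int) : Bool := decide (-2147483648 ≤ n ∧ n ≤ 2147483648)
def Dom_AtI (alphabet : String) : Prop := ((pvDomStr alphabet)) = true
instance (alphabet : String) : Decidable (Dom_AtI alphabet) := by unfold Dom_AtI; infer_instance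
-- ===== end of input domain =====

-- ===== PORT A =====
-- B replaces A's positional 26**girder sum with Horner's rule (objective: faster, one multiply-add per char).
-- girder is carried as a Nat: in Python it starts at len-1 and is only read while ≥ 0, so Nat subtraction is exact here.
def AtI_go (r : Int) (g : Nat) (l : List Char) : Int :=
  match l with
  | [] => r
  | c :: rest =>
      AtI_go (r + (((PySem.Chars.upperChar c).toNat : Int) - 65 + 1) * 26 ^ g) (g - 1) rest

def AtI (alphabet : String) : Int :=
  AtI_go 0 (alphabet.toList.length - 1) alphabet.toList

-- ===== PORT B =====
def AtI_alt (alphabet : String) : Int :=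
  alphabet.toList.foldl (fun r c => r * 26 + (((PySem.Chars.upperChar c).toNat : Int) - 65 + 1)) 0

-- ===== PRECONDITION & SPEC =====
def Spec_AtI (alphabet : String) (out : Int) : Prop := out = AtI_alt alphabet
instance (alphabet : String) (out : Int) : Decidable (Spec_AtI alphabet out) := by unfold Spec_AtI; infer_instance

-- ===== CLAIM (what is proved, stated in full; the proofs are below) =====
def Claim_equal_AtI : Prop := ∀ (alphabet : String), Dom_AtI alphabet → Spec_AtI alphabet (AtI alphabet)

-- ===== LEMMAS AND PROOFS =====
theorem horner_acc (l : List Char) (acc : Int) :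
    l.foldl (fun r c => r * 26 + (((PySem.Chars.upperChar c).toNat : Int) - 65 + 1)) acc
      = acc * 26 ^ l.length
        + l.foldl (fun r c => r * 26 + (((PySem.Chars.upperChar c).toNat : Int) - 65 + 1)) 0 := by
  induction l generalizing acc with
  | nil => simp
  | cons c rest ih =>
      simp only [List.foldl_cons, List.length_cons]
      rw [ih (acc * 26 + _), ih (0 * 26 + _)]
      ring

theorem horner_cons (c : Char) (rest : List Char) :
    (c :: rest).foldl (fun r c => r * 26 + (((PySem.Chars.upperChar c).toNat : Int) - 65 + 1)) 0
      = (((PySem.Chars.upperChar c).toNat : Int) - 65 + 1) * 26 ^ rest.length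
        + rest.foldl (fun r c => r * 26 + (((PySem.Chars.upperChar c).toNat : Int) - 65 + 1)) 0 := by
  rw [List.foldl_cons, horner_acc rest]
  ring

theorem go_eq (l : List Char) (r : Int) :
    AtI_go r (l.length - 1) l
      = r + l.foldl (fun r c => r * 26 + (((PySem.Chars.upperChar c).toNat : Int) - 65 + 1)) 0 := by
  induction l generalizing r with
  | nil => simp [AtI_go]
  | cons c rest ih =>
      show AtI_go (r + _ * 26 ^ (rest.length + 1 - 1)) (rest.length + 1 - 1 - 1) (rest) = _
      simp only [Nat.add_sub_cancel]
      rw [ih, horner_cons]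
      ring

-- ===== VERDICT (by name: the statement is the Claim_ definition above) =====
theorem AtI_spec : Claim_equal_AtI := by
  intro a _
  unfold Spec_AtI AtI AtI_alt
  rw [go_eq]
  ring
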